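-- pv_equiv track=rewrite | github.com/hamzaiftkhar/100-Days-of-Code-with-Python | Day-29/Question-5.py | max_tuple_sum
-- ===== SOURCE A (Python) =====
-- def max_tuple_sum(list1, list2):
--     max_sum = 0
--
--     for tuple1 in list1:
--         for tuple2 in list2:
--             current_sum = sum(tuple1) + sum(tuple2)
--             if current_sum > max_sum:
--                 max_sum = current_sum
--
--     return max_sum
-- ===== SOURCE B (Python) =====
-- def max_tuple_sum(list1, list2):
--     if not list1 or not list2:
--         return 0
--     best1 = max(map(sum, list1))
--     best2 = max(map(sum, list2))
--     return max(0, best1 + best2)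
-- ===== Notes on version B (the rewrite author's own statement) =====
-- stated objective: faster
-- what changed: Replaces the O(n*m) nested loop over all pairs by computing the maximum tuple-sum of each list separately, adding them, and clamping at 0 (O(n+m)).
import Mathlib
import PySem

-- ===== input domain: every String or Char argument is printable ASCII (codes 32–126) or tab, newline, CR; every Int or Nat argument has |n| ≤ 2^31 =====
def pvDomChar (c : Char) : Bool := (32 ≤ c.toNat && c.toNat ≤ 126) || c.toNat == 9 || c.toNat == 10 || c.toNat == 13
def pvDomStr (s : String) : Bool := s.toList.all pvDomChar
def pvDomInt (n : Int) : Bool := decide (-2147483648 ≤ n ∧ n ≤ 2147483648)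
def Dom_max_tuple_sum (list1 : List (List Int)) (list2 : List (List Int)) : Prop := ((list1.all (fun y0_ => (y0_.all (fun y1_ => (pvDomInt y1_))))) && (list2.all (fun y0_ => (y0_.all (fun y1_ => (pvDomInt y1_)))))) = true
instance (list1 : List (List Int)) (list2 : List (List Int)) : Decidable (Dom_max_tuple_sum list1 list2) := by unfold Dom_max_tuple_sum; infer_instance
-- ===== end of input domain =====

-- B replaces A's O(n*m) scan of all pairs by the maximum tuple-sum of each list
-- separately, added and clamped at 0 (objective: faster, asymptotic).

-- ===== PORT A =====
-- literal port of A's nested loop with running max_sum starting at 0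
def max_tuple_sum (list1 : List (List Int)) (list2 : List (List Int)) : Int :=
  list1.foldl (fun max_sum tuple1 =>
    list2.foldl (fun max_sum tuple2 =>
      let current_sum := tuple1.sum + tuple2.sum
      if current_sum > max_sum then current_sum else max_sum) max_sum) 0

-- ===== PORT B =====
-- literal port of Source B: empty check, max of per-list tuple sums, max(0, best1 + best2)
def max_tuple_sum_alt (list1 : List (List Int)) (list2 : List (List Int)) : Int :=
  if list1 = [] ∨ list2 = [] then 0
  else
    let best1 := (PySem.List.max? (list1.map (fun t => t.sum)) (fun y => y)).getD 0
    let best2 := (PySem.List.max? (list2.map (fun t => t.sum)) (fun y => y)).getD 0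
    max 0 (best1 + best2)

-- ===== PRECONDITION & SPEC =====
def Spec_max_tuple_sum (list1 : List (List Int)) (list2 : List (List Int)) (out : Int) : Prop := out = max_tuple_sum_alt list1 list2
instance (list1 : List (List Int)) (list2 : List (List Int)) (out : Int) : Decidable (Spec_max_tuple_sum list1 list2 out) := by unfold Spec_max_tuple_sum; infer_instance

-- ===== CLAIM (what is proved, stated in full; the proofs are below) =====
def Claim_equal_max_tuple_sum : Prop := ∀ (list1 : List (List Int)) (list2 : List (List Int)), Dom_max_tuple_sum list1 list2 → Spec_max_tuple_sum list1 list2 (max_tuple_sum list1 list2)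

-- ===== LEMMAS AND PROOFS =====

-- A's branch is a running max
lemma if_gt_eq_max (c m : Int) : (if c > m then c else m) = max m c := by
  rcases le_total c m with h | h <;> simp [max_def] <;> omega

-- pulling the start of a foldl max out front
lemma foldl_max_shift (l : List Int) : ∀ m m' : Int,
    l.foldl max (max m m') = max m (l.foldl max m') := by
  induction l with
  | nil => intro m m'; rfl
  | cons a t ih => intro m m'; simp only [List.foldl_cons, max_assoc, ih]

-- addition of a constant distributes through foldl max
lemma foldl_max_add_left (s : Int) (l : List Int) : ∀ m : Int,
    (l.map (fun v => s + v)).foldl max (s + m) = s + l.foldl max m := by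
  induction l with
  | nil => intro m; rfl
  | cons a t ih =>
      intro m
      simp only [List.map_cons, List.foldl_cons]
      rw [max_add_add_left, ih]

lemma foldl_max_add_right (s : Int) (l : List Int) : ∀ m : Int,
    (l.map (fun v => v + s)).foldl max (m + s) = l.foldl max m + s := by
  induction l with
  | nil => intro m; rfl
  | cons a t ih =>
      intro m
      simp only [List.map_cons, List.foldl_cons]
      rw [max_add_add_right, ih]

-- A's inner loop is a foldl max over the shifted sums
lemma inner_as_max (s1 : Int) (l : List (List Int)) : ∀ m : Int,
    l.foldl (fun max_sum tuple2 =>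
        let current_sum := s1 + tuple2.sum
        if current_sum > max_sum then current_sum else max_sum) m
      = (l.map (fun t => s1 + t.sum)).foldl max m := by
  induction l with
  | nil => intro m; rfl
  | cons a t ih =>
      intro m
      simp only [List.foldl_cons, List.map_cons]
      rw [if_gt_eq_max]
      exact ih _

-- A's inner loop over a nonempty list2 computes max m (s1 + best2)
lemma inner_loop (s1 : Int) (u : List Int) (us : List (List Int)) (m : Int) :
    (u :: us).foldl (fun max_sum tuple2 =>
        let current_sum := s1 + tuple2.sum
        if current_sum > max_sum then current_sum else max_sum) m
      = max m (s1 + (us.map (fun t => t.sum)).foldl max u.sum) := by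
  rw [inner_as_max]
  simp only [List.map_cons, List.foldl_cons]
  have hcomp : (fun t : List Int => s1 + t.sum)
      = (fun v => s1 + v) ∘ (fun t : List Int => t.sum) := rfl
  calc (us.map (fun t => s1 + t.sum)).foldl max (max m (s1 + u.sum))
      = max m ((us.map (fun t => s1 + t.sum)).foldl max (s1 + u.sum)) := foldl_max_shift _ m _
    _ = max m (s1 + (us.map (fun t => t.sum)).foldl max u.sum) := by
        rw [hcomp, ← List.map_map, foldl_max_add_left]

lemma main_eq (list1 list2 : List (List Int)) :
    max_tuple_sum list1 list2 = max_tuple_sum_alt list1 list2 := by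
  unfold max_tuple_sum max_tuple_sum_alt
  rcases list1 with _ | ⟨u, us⟩
  · simp
  rcases list2 with _ | ⟨v, vs⟩
  · simp only [List.foldl_nil]
    have hconst : ∀ (l : List (List Int)) (m : Int), l.foldl (fun max_sum _ => max_sum) m = m := by
      intro l
      induction l with
      | nil => intro m; rfl
      | cons a t ih => intro m; exact ih m
    simp [hconst]
  · -- both lists nonempty
    set G2 : Int := (vs.map (fun t => t.sum)).foldl max v.sum with hG2
    have hinner : ∀ (s1 m : Int),
        (v :: vs).foldl (fun max_sum tuple2 =>
          if s1 + tuple2.sum > max_sum then s1 + tuple2.sum else max_sum) m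
        = max m (s1 + G2) := by
      intro s1 m
      simpa [hG2] using inner_loop s1 v vs m
    have houter : ∀ (l : List (List Int)) (m : Int),
        l.foldl (fun max_sum tuple1 =>
          (v :: vs).foldl (fun ms tuple2 =>
            if tuple1.sum + tuple2.sum > ms then tuple1.sum + tuple2.sum else ms) max_sum) m
        = (l.map (fun t => t.sum + G2)).foldl max m := by
      intro l
      induction l with
      | nil => intro m; rfl
      | cons a t ih =>
          intro m
          simp only [List.foldl_cons, List.map_cons]
          have h := hinner a.sum m
          simp only [List.foldl_cons] at h
          rw [h]
          have ih' := ih (max m (a.sum + G2))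
          simp only [List.foldl_cons] at ih'
          exact ih'
    rw [houter]
    have hne : ¬((u :: us : List (List Int)) = [] ∨ (v :: vs : List (List Int)) = []) := by simp
    rw [if_neg hne]
    simp only [List.map_cons, PySem.List.max?_id_cons, Option.getD_some, List.foldl_cons]
    have hcomp : (fun t : List Int => t.sum + G2)
        = (fun w => w + G2) ∘ (fun t : List Int => t.sum) := rfl
    calc ((us.map (fun t => t.sum + G2))).foldl max (max 0 (u.sum + G2))
        = max 0 ((us.map (fun t => t.sum + G2)).foldl max (u.sum + G2)) := foldl_max_shift _ 0 _
      _ = max 0 ((us.map (fun t => t.sum)).foldl max u.sum + G2) := by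
          rw [hcomp, ← List.map_map, foldl_max_add_right]

-- ===== VERDICT (by name: the statement is the Claim_ definition above) =====
theorem max_tuple_sum_spec : Claim_equal_max_tuple_sum := by
  intro list1 list2 _
  unfold Spec_max_tuple_sum
  exact main_eq list1 list2
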